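-- pv_equiv track=rewrite | github.com/Kludex/mangum | mangum/handlers/aws_alb.py | case_mutated_headers
-- ===== SOURCE A (Python) =====
-- from typing import Any, Dict, Generator, List, Tuple
-- from itertools import islice
--
-- def all_casings(input_string: str) -> Generator:
--     """
--     Permute all casings of a given string.
--     A pretty algoritm, via @Amber
--     http://stackoverflow.com/questions/6792803/finding-all-possible-case-permutations-in-python
--     """
--     if not input_string:
--         yield ""
--     else:
--         first = input_string[:1]
--         if first.lower() == first.upper():
--             for sub_casing in all_casings(input_string[1:]):
--                 yield first + sub_casing
--         else:
--             for sub_casing in all_casings(input_string[1:]):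
--                 yield first.lower() + sub_casing
--                 yield first.upper() + sub_casing
--
-- def case_mutated_headers(multi_value_headers: Dict[str, List[str]]) -> Dict[str, str]:
--     """Create str/str key/value headers, with duplicate keys case mutated."""
--     headers = {}
--     for key, values in multi_value_headers.items():
--         if len(values) > 0:
--             casings = list(islice(all_casings(key), len(values)))
--             for value, cased_key in zip(values, casings):
--                 headers[cased_key] = value
--     return headers
-- ===== SOURCE B (Python) =====
-- def case_mutated_headers(multi_value_headers):
--     """Create str/str key/value headers, with duplicate keys case mutated."""
--     headers = {}
--     for key, values in multi_value_headers.items():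
--         caseable = sum(1 for ch in key if ch.lower() != ch.upper())
--         n = min(len(values), 1 << caseable)
--         for i in range(n):
--             headers[_cased(key, i)] = values[i]
--     return headers
--
--
-- def _cased(key, i):
--     """The i-th casing of key: bit j of i picks lower/upper for the j-th caseable char."""
--     out = []
--     for ch in key:
--         if ch.lower() == ch.upper():
--             out.append(ch)
--         else:
--             out.append(ch.upper() if i & 1 else ch.lower())
--             i >>= 1
--     return ''.join(out)
-- ===== Notes on version B (the rewrite author's own statement) =====
-- stated objective: alternative
-- what changed: Replaces the recursive all_casings generator (which materialises casings in yield order and islices them) with direct bit-indexed construction: the i-th cased key is computed from the bits of i in one pass over the key, bit j choosing lower/upper for the j-th caseable character.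
import Mathlib
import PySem

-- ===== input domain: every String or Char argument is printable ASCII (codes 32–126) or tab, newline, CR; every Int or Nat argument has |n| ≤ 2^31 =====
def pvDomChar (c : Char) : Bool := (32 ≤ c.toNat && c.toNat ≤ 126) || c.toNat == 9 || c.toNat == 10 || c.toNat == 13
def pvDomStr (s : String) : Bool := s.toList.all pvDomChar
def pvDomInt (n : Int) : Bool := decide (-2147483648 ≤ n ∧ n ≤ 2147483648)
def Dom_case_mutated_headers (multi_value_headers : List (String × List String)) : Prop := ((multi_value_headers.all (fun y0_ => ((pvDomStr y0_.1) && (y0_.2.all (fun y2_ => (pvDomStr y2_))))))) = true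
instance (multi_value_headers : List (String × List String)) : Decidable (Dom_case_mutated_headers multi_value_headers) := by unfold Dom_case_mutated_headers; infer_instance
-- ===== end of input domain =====

-- B replaces A's recursive all-casings generator by computing the i-th casing directly
-- from the bits of i (objective: alternative/simpler; equal return values proved below).

-- ===== PORT A =====
-- all_casings: recursive generator, materialised as the list of casings in yield order
def allCasings : List Char → List (List Char)
  | [] => [[]]
  | c :: rest =>
    if PySem.Chars.lowerChar c == PySem.Chars.upperChar c then
      (allCasings rest).map (fun s => c :: s)
    else
      (allCasings rest).flatMap (fun s => [PySem.Chars.lowerChar c :: s, PySem.Chars.upperChar c :: s])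

def case_mutated_headers (multi_value_headers : List (String × List String)) : List (String × String) :=
  (multi_value_headers.foldl
    (fun (headers : PySem.Dict String String) kv =>
      let key := kv.1
      let values := kv.2
      if values.length > 0 then
        -- list(islice(all_casings(key), len(values)))
        let casings := (allCasings key.toList).take values.length
        (values.zip casings).foldl (fun h vc => h.insert (String.mk vc.2) vc.1) headers
      else headers)
    PySem.Dict.empty).items

-- ===== PORT B =====
-- _cased(key, i): bit j of i picks lower/upper for the j-th caseable char
def casedChars : List Char → Nat → List Char
  | [], _ => []
  | ch :: rest, i =>
    if PySem.Chars.lowerChar ch == PySem.Chars.upperChar ch then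
      ch :: casedChars rest i
    else
      (if i % 2 == 1 then PySem.Chars.upperChar ch else PySem.Chars.lowerChar ch) :: casedChars rest (i / 2)

def case_mutated_headers_alt (multi_value_headers : List (String × List String)) : List (String × String) :=
  (multi_value_headers.foldl
    (fun (headers : PySem.Dict String String) kv =>
      let key := kv.1
      let values := kv.2
      let caseable := key.toList.countP (fun ch => PySem.Chars.lowerChar ch != PySem.Chars.upperChar ch)
      let n := min values.length (2 ^ caseable)
      -- values[i]: i < n ≤ len(values) always, so getD with a junk default is exact
      (List.range n).foldl
        (fun h i => h.insert (String.mk (casedChars key.toList i)) (values.getD i "")) headers)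
    PySem.Dict.empty).items

-- ===== PRECONDITION & SPEC =====
def Spec_case_mutated_headers (multi_value_headers : List (String × List String)) (out : List (String × String)) : Prop := out = case_mutated_headers_alt multi_value_headers
instance (multi_value_headers : List (String × List String)) (out : List (String × String)) : Decidable (Spec_case_mutated_headers multi_value_headers out) := by unfold Spec_case_mutated_headers; infer_instance

-- ===== CLAIM (what is proved, stated in full; the proofs are below) =====
def Claim_equal_case_mutated_headers : Prop := ∀ (multi_value_headers : List (String × List String)), Dom_case_mutated_headers multi_value_headers → Spec_case_mutated_headers multi_value_headers (case_mutated_headers multi_value_headers)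

-- ===== LEMMAS AND PROOFS =====

-- range(2*n) as consecutive pairs (2k, 2k+1)
theorem pvRangeTwoMul (n : Nat) :
    List.range (2 * n) = (List.range n).flatMap (fun k => [2 * k, 2 * k + 1]) := by
  induction n with
  | zero => rfl
  | succ n ih =>
    have h1 : 2 * (n + 1) = (2 * n + 1) + 1 := by omega
    rw [h1, List.range_succ, List.range_succ, List.range_succ, ih]
    simp [List.flatMap_append]

-- all_casings(key) is exactly [ _cased(key, i) for i in range(2 ** caseable) ]
theorem allCasings_eq_map_casedChars (s : List Char) :
    allCasings s = (List.range (2 ^ s.countP (fun ch => PySem.Chars.lowerChar ch != PySem.Chars.upperChar ch))).map (casedChars s) := by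
  induction s with
  | nil => rfl
  | cons c rest ih =>
    simp only [List.countP_cons]
    by_cases hc : (PySem.Chars.lowerChar c == PySem.Chars.upperChar c) = true
    · have hb : (PySem.Chars.lowerChar c != PySem.Chars.upperChar c) = false := by
        simp [bne, hc]
      rw [allCasings, if_pos hc, ih, hb]
      simp only [Bool.false_eq_true, if_false, Nat.add_zero, List.map_map]
      apply List.map_congr_left
      intro i _
      simp [casedChars, hc, Function.comp]
    · have hb : (PySem.Chars.lowerChar c != PySem.Chars.upperChar c) = true := by
        simp [bne]
        simpa using hc
      rw [allCasings, if_neg (by simp [hc]), ih, hb]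
      simp only [if_true]
      have h2 : 2 ^ (List.countP (fun ch => PySem.Chars.lowerChar ch != PySem.Chars.upperChar ch) rest + 1)
          = 2 * 2 ^ List.countP (fun ch => PySem.Chars.lowerChar ch != PySem.Chars.upperChar ch) rest := by
        ring
      rw [h2, pvRangeTwoMul, List.flatMap_map, List.map_flatMap]
      apply List.flatMap_congr
      intro k _
      have h0 : (2 * k) % 2 = 0 := by omega
      have hh1 : (2 * k + 1) % 2 = 1 := by omega
      have hq0 : (2 * k) / 2 = k := by omega
      have hq1 : (2 * k + 1) / 2 = k := by omega
      simp [casedChars, hc, h0, hh1, hq0, hq1]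

theorem zip_range_map (values : List String) (m : Nat) (hm : m ≤ values.length)
    (f : Nat → List Char) :
    values.zip ((List.range m).map f)
      = (List.range m).map (fun i => (values.getD i "", f i)) := by
  apply List.ext_getElem
  · simp [hm]
  · intro i h1 h2
    simp only [List.getElem_zip, List.getElem_map, List.getElem_range]
    have hi : i < m := by simpa using h2
    have hiv : i < values.length := lt_of_lt_of_le hi hm
    rw [List.getD_eq_getElem values "" hiv]

-- the two per-entry loop bodies build the same dict
theorem step_eq (headers : PySem.Dict String String) (kv : String × List String) :
    (if kv.2.length > 0 then
        (kv.2.zip ((allCasings kv.1.toList).take kv.2.length)).foldl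
          (fun h vc => h.insert (String.mk vc.2) vc.1) headers
      else headers)
    = (List.range (min kv.2.length
          (2 ^ kv.1.toList.countP (fun ch => PySem.Chars.lowerChar ch != PySem.Chars.upperChar ch)))).foldl
        (fun h i => h.insert (String.mk (casedChars kv.1.toList i)) (kv.2.getD i "")) headers := by
  obtain ⟨key, values⟩ := kv
  by_cases hv : values.length > 0
  · simp only [hv, if_true]
    rw [allCasings_eq_map_casedChars, ← List.map_take, List.take_range,
        zip_range_map values _ (Nat.min_le_left _ _), List.foldl_map]
  · have h0 : values.length = 0 := by omega
    simp [h0]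

-- ===== VERDICT (by name: the statement is the Claim_ definition above) =====
theorem case_mutated_headers_spec : Claim_equal_case_mutated_headers := by
  intro mvh _
  unfold Spec_case_mutated_headers case_mutated_headers case_mutated_headers_alt
  congr 1
  congr 1
  funext d kv
  exact step_eq d kv
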